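-- pv_equiv track=rewrite | github.com/worms618/AoC2021 | src/day8/day8.py | groupSegmentLengthsWithNums
-- ===== SOURCE A (Python) =====
-- def groupSegmentLengthsWithNums(nums, segmentsPerNum):
--     segmentLengthsWithNums = dict()
--
--     for num in nums:
--         segmentLength = len(segmentsPerNum[num])
--         if not (segmentLength in segmentLengthsWithNums):
--             segmentLengthsWithNums.setdefault(segmentLength, [])
--         segmentLengthsWithNums[segmentLength].append(num)
--
--     return segmentLengthsWithNums
-- ===== SOURCE B (Python) =====
-- def groupSegmentLengthsWithNums(nums, segmentsPerNum):
--     lengths = [len(segmentsPerNum[num]) for num in nums]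
--     keys = list(dict.fromkeys(lengths))
--     return {k: [n for n, l in zip(nums, lengths) if l == k] for k in keys}
-- ===== Notes on version B (the rewrite author's own statement) =====
-- stated objective: alternative
-- what changed: B replaces A's single appending pass into a dict by three declarative passes: map nums to their segment lengths, dedup the lengths for the first-occurrence key order, then build each group with a per-key filter over the zipped (num, length) list.
import Mathlib
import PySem

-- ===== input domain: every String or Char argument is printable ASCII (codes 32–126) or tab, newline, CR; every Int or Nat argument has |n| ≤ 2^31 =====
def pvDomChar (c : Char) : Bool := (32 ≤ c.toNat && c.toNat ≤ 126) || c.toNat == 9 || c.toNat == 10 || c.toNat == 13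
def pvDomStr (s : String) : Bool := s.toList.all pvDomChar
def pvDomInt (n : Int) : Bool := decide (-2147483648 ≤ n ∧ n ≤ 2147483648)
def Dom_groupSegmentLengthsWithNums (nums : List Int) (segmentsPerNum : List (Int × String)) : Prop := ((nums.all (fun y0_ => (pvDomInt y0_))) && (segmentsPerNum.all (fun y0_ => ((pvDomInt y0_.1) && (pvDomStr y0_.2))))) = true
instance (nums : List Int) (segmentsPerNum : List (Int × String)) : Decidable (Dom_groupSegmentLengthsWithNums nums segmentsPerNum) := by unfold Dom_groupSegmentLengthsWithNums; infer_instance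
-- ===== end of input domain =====

-- B groups by mapping to lengths, deduping the keys, then filtering per key, instead of A's
-- single appending pass into a dict (objective: alternative decomposition, same result).
-- ===== PORT A =====
def groupSegmentLengthsWithNums (nums : List Int) (segmentsPerNum : List (Int × String)) : List (Int × List Int) :=
  let spn : PySem.Dict Int String := PySem.Dict.mk segmentsPerNum
  (nums.foldl (fun d num =>
    let segmentLength : Int := PySem.Str.len ((PySem.Dict.get? spn num).getD "")
    let d := if !(PySem.Dict.contains d segmentLength) then PySem.Dict.setdefault d segmentLength [] else d
    PySem.Dict.modify d segmentLength [] (· ++ [num])) PySem.Dict.empty).items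

-- ===== PORT B =====
def groupSegmentLengthsWithNums_alt (nums : List Int) (segmentsPerNum : List (Int × String)) : List (Int × List Int) :=
  let spn : PySem.Dict Int String := PySem.Dict.mk segmentsPerNum
  let lengths : List Int := nums.map (fun num => PySem.Str.len ((PySem.Dict.get? spn num).getD ""))
  let keys : List Int := PySem.List.dedup lengths
  keys.map (fun k => (k, ((nums.zip lengths).filter (fun p => p.2 == k)).map Prod.fst))

-- ===== PRECONDITION & SPEC =====
-- Pre_ excludes exactly the inputs where some num is missing from the dict: there Python A raises KeyError.
def Pre_groupSegmentLengthsWithNums (nums : List Int) (segmentsPerNum : List (Int × String)) : Prop :=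
  ∀ n ∈ nums, n ∈ segmentsPerNum.map Prod.fst
instance (nums : List Int) (segmentsPerNum : List (Int × String)) : Decidable (Pre_groupSegmentLengthsWithNums nums segmentsPerNum) := by unfold Pre_groupSegmentLengthsWithNums; infer_instance
def pvWitness_groupSegmentLengthsWithNums : List Int × (List (Int × String)) := ([1, 2, 1], [(1, "ab"), (2, "abc")])
def Spec_groupSegmentLengthsWithNums (nums : List Int) (segmentsPerNum : List (Int × String)) (out : List (Int × List Int)) : Prop := out = groupSegmentLengthsWithNums_alt nums segmentsPerNum
instance (nums : List Int) (segmentsPerNum : List (Int × String)) (out : List (Int × List Int)) : Decidable (Spec_groupSegmentLengthsWithNums nums segmentsPerNum out) := by unfold Spec_groupSegmentLengthsWithNums; infer_instance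

-- ===== CLAIM (what is proved, stated in full; the proofs are below) =====
def Claim_equal_groupSegmentLengthsWithNums : Prop := ∀ (nums : List Int) (segmentsPerNum : List (Int × String)), Dom_groupSegmentLengthsWithNums nums segmentsPerNum → Pre_groupSegmentLengthsWithNums nums segmentsPerNum → Spec_groupSegmentLengthsWithNums nums segmentsPerNum (groupSegmentLengthsWithNums nums segmentsPerNum)

-- ===== LEMMAS AND PROOFS =====

-- A's loop body equals a plain 'modify (append num)' (the setdefault only pre-creates the key).
theorem pv_step_eq (d : PySem.Dict Int (List Int)) (k : Int) (n : Int) :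
    (if !(PySem.Dict.contains d k) then PySem.Dict.setdefault d k [] else d).modify k [] (· ++ [n])
      = PySem.Dict.modify d k [] (· ++ [n]) := by
  by_cases h : PySem.Dict.contains d k = true
  · simp [h]
  · simp only [Bool.not_eq_true] at h
    simp only [h, Bool.not_false, if_pos]
    rw [PySem.Dict.setdefault_of_not_contains _ _ h]
    unfold PySem.Dict.modify
    rw [PySem.Dict.getD_insert_self, PySem.Dict.insert_insert_self,
        PySem.Dict.getD_of_not_contains _ _ h]

theorem pv_zip_filter (nums : List Int) (f : Int → Int) (k : Int) :
    ((nums.zip (nums.map f)).filter (fun p => p.2 == k)).map Prod.fst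
      = nums.filter (fun n => f n == k) := by
  induction nums with
  | nil => rfl
  | cons x xs ih =>
    simp only [List.map_cons, List.zip_cons_cons, List.filter_cons]
    by_cases h : f x == k
    · simp [h, ih]
    · simp only [h] at *
      simpa using ih

theorem pv_pairs_filter (nums : List Int) (f : Int → Int) (k : Int) :
    (((nums.map (fun n => (f n, n))).filter (fun p => p.1 == k)).map Prod.snd)
      = nums.filter (fun n => f n == k) := by
  induction nums with
  | nil => rfl
  | cons x xs ih =>
    simp only [List.map_cons, List.filter_cons]
    by_cases h : f x == k
    · simp [h, ih]
    · simp only [h] at *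
      simpa using ih

-- A's whole loop, characterised: items = deduped key list paired with the filtered groups.
theorem pv_loop_items (nums : List Int) (f : Int → Int) :
    (nums.foldl (fun d n => PySem.Dict.modify d (f n) [] (· ++ [n])) PySem.Dict.empty).items
      = (PySem.List.dedup (nums.map f)).map
          (fun k => (k, nums.filter (fun n => f n == k))) := by
  set D := nums.foldl (fun d n => PySem.Dict.modify d (f n) [] (· ++ [n])) PySem.Dict.empty with hD
  have hnd : D.keys.Nodup := by
    rw [hD]
    exact PySem.Dict.nodup_keys_foldl_modify_key nums f [] (fun d n => (· ++ [n])) _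
      PySem.Dict.nodup_keys_empty
  have hkeys : D.keys = PySem.List.dedup (nums.map f) := by
    rw [hD, PySem.Dict.keys_foldl_modify_key]
    simp [PySem.Dict.keys_empty, PySem.Set.update_nil_left]
  have hget : ∀ k, D.getD k [] = nums.filter (fun n => f n == k) := by
    intro k
    have hfold : D = (nums.map (fun n => (f n, n))).foldl
        (fun d p => PySem.Dict.modify d p.1 [] (· ++ [p.2])) PySem.Dict.empty := by
      rw [hD, List.foldl_map]
    rw [hfold, PySem.Dict.getD_foldl_modify_append]
    rw [PySem.Dict.getD_empty]
    simp only [List.nil_append]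
    exact pv_pairs_filter nums f k
  rw [PySem.Dict.items_eq_map_keys D hnd [], hkeys]
  exact List.map_congr_left (fun k _ => by rw [hget k])

-- ===== VERDICT (by name: the statement is the Claim_ definition above) =====
theorem groupSegmentLengthsWithNums_spec : Claim_equal_groupSegmentLengthsWithNums := by
  intro nums segmentsPerNum _ _
  unfold Spec_groupSegmentLengthsWithNums groupSegmentLengthsWithNums groupSegmentLengthsWithNums_alt
  set f : Int → Int := fun num =>
    PySem.Str.len ((PySem.Dict.get? (PySem.Dict.mk segmentsPerNum) num).getD "") with hf
  have hstep : (nums.foldl (fun d num =>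
      let segmentLength : Int := f num
      let d := if !(PySem.Dict.contains d segmentLength) then PySem.Dict.setdefault d segmentLength [] else d
      PySem.Dict.modify d segmentLength [] (· ++ [num])) PySem.Dict.empty)
      = nums.foldl (fun d n => PySem.Dict.modify d (f n) [] (· ++ [n])) PySem.Dict.empty := by
    apply PySem.List.foldl_congr_mem
    intro d n _
    exact pv_step_eq d (f n) n
  simp only []
  rw [hstep, pv_loop_items nums f]
  rw [PySem.List.dedup_eq_ofList]
  apply List.map_congr_left
  intro k _
  rw [pv_zip_filter nums f k]
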